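-- pv_equiv track=rewrite | github.com/dsYuk/Algorithm | Programers/lv1/모의고사.py | solution
-- ===== SOURCE A (Python) =====
-- def solution(answers):
--     answer = []
--     correct = [0, 0, 0]
--     a1 = [1, 2, 3, 4, 5]
--     a2 = [2, 1, 2, 3, 2, 4, 2, 5]
--     a3 = [3, 3, 1, 1, 2, 2, 4, 4, 5, 5]
--
--     for i in range(len(answers)):
--         if answers[i] == a1[i%5]:
--             correct[0] += 1
--         if answers[i] == a2[i%8]:
--             correct[1] += 1
--         if answers[i] == a3[i%10]:
--             correct[2] += 1
--
--     win = max(correct)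
--     for i in range(len(correct)):
--         if correct[i] == win:
--             answer.append(i + 1)
--     return answer
-- ===== SOURCE B (Python) =====
-- def count_matches(answers, p):
--     L = len(p)
--     c = 0
--     for j in range(0, len(answers), L):
--         for x, y in zip(answers[j:j+L], p):
--             c += x == y
--     return c
--
--
-- def solution(answers):
--     patterns = [[1, 2, 3, 4, 5],
--                 [2, 1, 2, 3, 2, 4, 2, 5],
--                 [3, 3, 1, 1, 2, 2, 4, 4, 5, 5]]
--     correct = [count_matches(answers, p) for p in patterns]
--     win = max(correct)
--     return [k + 1 for k in range(3) if correct[k] == win]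
-- ===== Notes on version B (the rewrite author's own statement) =====
-- stated objective: alternative
-- what changed: Replaces A's answer-major single scan with three modular-index branches by a pattern-major block strategy: for each answer key the sheet is cut into pattern-length chunks (range with step len(p)) and each chunk is zipped against the key, so scores are computed with slicing and zip instead of per-index modulo lookups.
import Mathlib
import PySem

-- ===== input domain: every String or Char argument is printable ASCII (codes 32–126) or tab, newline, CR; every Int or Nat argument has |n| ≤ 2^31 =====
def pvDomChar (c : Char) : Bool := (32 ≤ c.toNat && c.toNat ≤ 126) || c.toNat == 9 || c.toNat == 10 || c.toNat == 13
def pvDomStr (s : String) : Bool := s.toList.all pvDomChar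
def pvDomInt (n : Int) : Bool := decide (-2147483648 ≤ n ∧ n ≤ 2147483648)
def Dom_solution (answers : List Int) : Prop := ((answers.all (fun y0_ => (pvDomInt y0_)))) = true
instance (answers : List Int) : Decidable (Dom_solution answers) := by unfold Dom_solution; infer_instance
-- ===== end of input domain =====

-- B replaces A's answer-major scan with modular-index branches by a pattern-major,
-- chunk-and-zip computation of the three scores; alternative decomposition, same cost.

-- ===== PORT A =====
-- Literal port of A. Loop indices i come from range(len(answers)), so they are
-- nonnegative and in range; pyGetD/pySetD and PySem.Int.mod are exact there.
-- `correct` always has the 3 elements [_,_,_], so Python's max(correct) never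
-- raises and `(PySem.List.max? correct (fun x => x)).getD 0` is exact.
def solution (answers : List Int) : List Int :=
  let a1 : List Int := [1, 2, 3, 4, 5]
  let a2 : List Int := [2, 1, 2, 3, 2, 4, 2, 5]
  let a3 : List Int := [3, 3, 1, 1, 2, 2, 4, 4, 5, 5]
  let correct : List Int :=
    (PySem.List.pyRange 0 (answers.length : Int) 1).foldl (fun c i =>
      let c := if PySem.List.pyGetD answers i 0 = PySem.List.pyGetD a1 (PySem.Int.mod i 5) 0
               then PySem.List.pySetD c 0 (PySem.List.pyGetD c 0 0 + 1) else c
      let c := if PySem.List.pyGetD answers i 0 = PySem.List.pyGetD a2 (PySem.Int.mod i 8) 0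
               then PySem.List.pySetD c 1 (PySem.List.pyGetD c 1 0 + 1) else c
      if PySem.List.pyGetD answers i 0 = PySem.List.pyGetD a3 (PySem.Int.mod i 10) 0
      then PySem.List.pySetD c 2 (PySem.List.pyGetD c 2 0 + 1) else c)
      [0, 0, 0]
  let win := (PySem.List.max? correct (fun x => x)).getD 0
  (PySem.List.pyRange 0 (correct.length : Int) 1).foldl (fun acc i =>
    if PySem.List.pyGetD correct i 0 = win then acc ++ [i + 1] else acc) []

-- ===== PORT B =====
-- Literal port of B's helper count_matches: for j in range(0, len(answers), len(p)),
-- zip the chunk answers[j:j+len(p)] with p and count matches (`c += x == y`).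
def count_matches (answers p : List Int) : Int :=
  (PySem.List.pyRange 0 (answers.length : Int) ((p.length : Nat) : Int)).foldl
    (fun c j =>
      ((PySem.List.slice answers (some j) (some (j + ((p.length : Nat) : Int)))).zip p).foldl
        (fun c xy => if xy.1 = xy.2 then c + 1 else c) c)
    0

-- Literal port of B (Source B): `correct` scores via count_matches, then the winners.
-- `correct` has 3 elements, so max(correct) never raises and `.getD 0` is exact.
def solution_alt (answers : List Int) : List Int :=
  let patterns : List (List Int) :=
    [[1, 2, 3, 4, 5], [2, 1, 2, 3, 2, 4, 2, 5], [3, 3, 1, 1, 2, 2, 4, 4, 5, 5]]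
  let correct : List Int := patterns.map (fun p => count_matches answers p)
  let win := (PySem.List.max? correct (fun x => x)).getD 0
  (PySem.List.pyRange 0 3 1).foldl (fun acc k =>
    if PySem.List.pyGetD correct k 0 = win then acc ++ [k + 1] else acc) []

-- ===== PRECONDITION & SPEC =====
def Spec_solution (answers : List Int) (out : List Int) : Prop := out = solution_alt answers
instance (answers : List Int) (out : List Int) : Decidable (Spec_solution answers out) := by unfold Spec_solution; infer_instance

-- ===== CLAIM (what is proved, stated in full; the proofs are below) =====
def Claim_equal_solution : Prop := ∀ (answers : List Int), Dom_solution answers → Spec_solution answers (solution answers)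

-- ===== LEMMAS AND PROOFS =====

-- score of pattern p on the first m answers, as a range sum
def pvScore (ans p : List Int) (m : Nat) : Int :=
  ((List.range m).map (fun k =>
    if ans.getD k 0 = p.getD (k % p.length) 0 then (1 : Int) else 0)).sum

lemma pvScore_succ (ans p : List Int) (m : Nat) :
    pvScore ans p (m + 1) = pvScore ans p m +
      (if ans.getD m 0 = p.getD (m % p.length) 0 then (1 : Int) else 0) := by
  simp [pvScore, List.range_succ]

lemma pvLoopA (ans : List Int) : ∀ (m : Nat) (c1 c2 c3 : Int),
    (PySem.List.pyRange 0 (m : Int) 1).foldl (fun c i =>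
      let c := if PySem.List.pyGetD ans i 0 = PySem.List.pyGetD [1,2,3,4,5] (PySem.Int.mod i 5) 0
               then PySem.List.pySetD c 0 (PySem.List.pyGetD c 0 0 + 1) else c
      let c := if PySem.List.pyGetD ans i 0 = PySem.List.pyGetD [2,1,2,3,2,4,2,5] (PySem.Int.mod i 8) 0
               then PySem.List.pySetD c 1 (PySem.List.pyGetD c 1 0 + 1) else c
      if PySem.List.pyGetD ans i 0 = PySem.List.pyGetD [3,3,1,1,2,2,4,4,5,5] (PySem.Int.mod i 10) 0
      then PySem.List.pySetD c 2 (PySem.List.pyGetD c 2 0 + 1) else c)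
      [c1, c2, c3]
    = [c1 + pvScore ans [1,2,3,4,5] m,
       c2 + pvScore ans [2,1,2,3,2,4,2,5] m,
       c3 + pvScore ans [3,3,1,1,2,2,4,4,5,5] m] := by
  intro m
  induction m with
  | zero =>
    intro c1 c2 c3
    simp [pvScore, PySem.List.pyRange_one_eq_nil]
  | succ m ih =>
    intro c1 c2 c3
    have h : ((m + 1 : Nat) : Int) = (m : Int) + 1 := by push_cast; ring
    rw [h, PySem.List.pyRange_one_succ_right (by positivity), List.foldl_append, ih]
    simp only [List.foldl_cons, List.foldl_nil]
    have e5 : PySem.Int.mod (m : Int) 5 = ((m % 5 : Nat) : Int) := by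
      rw [PySem.Int.mod_eq_emod_of_pos (by norm_num)]; push_cast; ring
    have e8 : PySem.Int.mod (m : Int) 8 = ((m % 8 : Nat) : Int) := by
      rw [PySem.Int.mod_eq_emod_of_pos (by norm_num)]; push_cast; ring
    have e10 : PySem.Int.mod (m : Int) 10 = ((m % 10 : Nat) : Int) := by
      rw [PySem.Int.mod_eq_emod_of_pos (by norm_num)]; push_cast; ring
    simp only [e5, e8, e10, PySem.List.pyGetD_natCast, pvScore_succ, List.length_cons,
      List.length_nil]
    norm_num [PySem.List.pySetD_of_nonneg]
    split_ifs
    all_goals norm_num [PySem.List.pyGetD, Int.toNat, List.set]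
    all_goals try ring
    all_goals constructor <;> try constructor
    all_goals trivial

-- B side: chunk-and-zip score equals pvScore.

-- match count of a zipped prefix, as a range sum
lemma pvZip_sum : ∀ (l q : List Int), l.length ≤ q.length →
    ((List.countP (fun xy => decide (xy.1 = xy.2)) (l.zip q) : Nat) : Int)
      = ((List.range l.length).map (fun k =>
          if l.getD k 0 = q.getD k 0 then (1 : Int) else 0)).sum := by
  intro l
  induction l with
  | nil => intro q h; simp
  | cons a l ih =>
    intro q h
    cases q with
    | nil => simp at h
    | cons b q' =>
      have h' : l.length ≤ q'.length := by simpa using h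
      simp only [List.zip_cons_cons, List.countP_cons, List.length_cons,
        List.range_succ_eq_map, List.map_cons, List.map_map, List.sum_cons,
        List.getD_cons_zero]
      have hsh : (List.map ((fun k => if (a :: l).getD k 0 = (b :: q').getD k 0
            then (1 : Int) else 0) ∘ Nat.succ) (List.range l.length))
          = List.map (fun k => if l.getD k 0 = q'.getD k 0 then (1 : Int) else 0)
              (List.range l.length) := by
        apply List.map_congr_left; intro k _
        simp [Function.comp]
      rw [hsh, ← ih q' h']
      push_cast
      by_cases hab : a = b <;> simp [hab] <;> try ring

lemma pvScore_of_le (ans p : List Int) (h : ans.length ≤ p.length) :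
    ((List.countP (fun xy => decide (xy.1 = xy.2)) (ans.zip p) : Nat) : Int)
      = pvScore ans p ans.length := by
  rw [pvZip_sum ans p h]
  unfold pvScore
  apply congrArg
  apply List.map_congr_left
  intro k hk
  rw [Nat.mod_eq_of_lt (by simp at hk; omega)]

lemma pvScore_split (ans p : List Int) (h : p.length ≤ ans.length) :
    pvScore ans p ans.length
      = ((List.countP (fun xy => decide (xy.1 = xy.2)) ((ans.take p.length).zip p) : Nat) : Int)
        + pvScore (ans.drop p.length) p (ans.length - p.length) := by
  obtain ⟨m, hm⟩ : ∃ m, ans.length = p.length + m := ⟨ans.length - p.length, by omega⟩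
  rw [hm, Nat.add_sub_cancel_left]
  unfold pvScore
  rw [List.range_add, List.map_append, List.sum_append]
  congr 1
  · rw [pvZip_sum (ans.take p.length) p (by simp)]
    rw [List.length_take, min_eq_left h]
    apply congrArg
    apply List.map_congr_left
    intro k hk
    simp only [List.mem_range] at hk
    rw [Nat.mod_eq_of_lt hk]
    simp [hk]
  · rw [List.map_map]
    apply congrArg
    apply List.map_congr_left
    intro k _
    simp only [Function.comp]
    rw [Nat.add_mod_left]
    simp [List.getD_eq_getElem?_getD, List.getElem?_drop]

-- number of chunks
def pvCnt (L n : Nat) : Nat := if 0 < n then (n + L - 1) / L else 0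

-- chunk-sum form of count_matches
def pvT (ans p : List Int) : Int :=
  ((List.range (pvCnt p.length ans.length)).map (fun k =>
    ((List.countP (fun xy => decide (xy.1 = xy.2))
      (((ans.drop (p.length * k)).take p.length).zip p) : Nat) : Int))).sum

lemma pvChunk_eq_T (ans p : List Int) (hL : 0 < p.length) :
    count_matches ans p = pvT ans p := by
  unfold count_matches pvT
  have hfun : (fun (c j : Int) =>
      ((PySem.List.slice ans (some j) (some (j + ((p.length : Nat) : Int)))).zip p).foldl
        (fun c xy => if xy.1 = xy.2 then c + 1 else c) c)
      = fun (c j : Int) => c +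
        ((List.countP (fun xy => decide (xy.1 = xy.2))
          ((PySem.List.slice ans (some j) (some (j + ((p.length : Nat) : Int)))).zip p) : Nat) : Int) := by
    funext c j
    exact PySem.List.foldl_ite_add_one _ _ _
  rw [hfun, PySem.List.foldl_add,
    PySem.List.pyRange_of_pos 0 (ans.length : Int) (by exact_mod_cast hL)]
  rw [List.map_map, zero_add]
  have hcnt : (if (0 : Int) < (ans.length : Int) then
      (((ans.length : Int) - 0 + (p.length : Int) - 1) / (p.length : Int)).toNat else 0)
      = pvCnt p.length ans.length := by
    unfold pvCnt
    by_cases h0 : 0 < ans.length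
    · rw [if_pos (by exact_mod_cast h0), if_pos h0]
      rw [show ((ans.length : Int) - 0 + (p.length : Int) - 1)
            = ((ans.length + p.length - 1 : Nat) : Int) from by
          have h1 : 1 ≤ ans.length + p.length := by omega
          push_cast [h1]
          ring]
      rw [← Int.natCast_div, Int.toNat_natCast]
    · have hz : ans.length = 0 := by omega
      simp [hz]
  rw [hcnt]
  apply congrArg
  apply List.map_congr_left
  intro k _
  simp only [Function.comp]
  have e2 : (0 : Int) + (p.length : Int) * (k : Int) + (p.length : Int)
      = ((p.length * k + p.length : Nat) : Int) := by push_cast; ring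
  have e1 : (0 : Int) + (p.length : Int) * (k : Int) = ((p.length * k : Nat) : Int) := by
    push_cast; ring
  rw [e2, e1, PySem.List.slice_natCast]
  rw [show p.length * k + p.length - p.length * k = p.length from by omega]

lemma pvT_eq_score (p : List Int) (hL : 0 < p.length) :
    ∀ n, ∀ ans : List Int, ans.length = n → pvT ans p = pvScore ans p n := by
  intro n
  induction n using Nat.strong_induction_on with
  | _ n ih =>
    intro ans hlen
    subst hlen
    by_cases h0 : ans.length = 0
    · simp [pvT, pvScore, pvCnt, h0]
    · have hcons : pvCnt p.length ans.length = pvCnt p.length (ans.length - p.length) + 1 := by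
        unfold pvCnt
        by_cases hle : ans.length ≤ p.length
        · rw [if_pos (by omega), show ans.length - p.length = 0 from by omega, if_neg (by omega)]
          exact Nat.div_eq_of_lt_le (by omega) (by omega)
        · rw [if_pos (by omega), if_pos (by omega)]
          rw [show ans.length + p.length - 1 = (ans.length - p.length + p.length - 1) + p.length
              from by omega]
          rw [Nat.add_div_right _ hL]
      unfold pvT
      rw [hcons, List.range_succ_eq_map, List.map_cons, List.map_map, List.sum_cons,
        Nat.mul_zero, List.drop_zero]
      have htail : (List.map ((fun k =>
            ((List.countP (fun xy => decide (xy.1 = xy.2))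
              (((ans.drop (p.length * k)).take p.length).zip p) : Nat) : Int)) ∘ Nat.succ)
          (List.range (pvCnt p.length (ans.length - p.length)))).sum
          = pvT (ans.drop p.length) p := by
        unfold pvT
        rw [List.length_drop]
        apply congrArg
        apply List.map_congr_left
        intro k _
        simp only [Function.comp]
        rw [Nat.mul_succ, Nat.add_comm, ← List.drop_drop]
      rw [htail, ih (ans.length - p.length) (by omega) (ans.drop p.length) (by simp)]
      by_cases hle : p.length ≤ ans.length
      · rw [pvScore_split ans p hle]
      · rw [show ans.length - p.length = 0 from by omega,
          List.take_of_length_le (by omega), pvScore_of_le ans p (by omega)]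
        simp [pvScore]

lemma count_matches_eq_score (ans p : List Int) (hL : 0 < p.length) :
    count_matches ans p = pvScore ans p ans.length :=
  (pvChunk_eq_T ans p hL).trans (pvT_eq_score p hL ans.length ans rfl)

-- ===== VERDICT (by name: the statement is the Claim_ definition above) =====
theorem solution_spec : Claim_equal_solution := by
  intro answers _
  unfold Spec_solution solution solution_alt
  simp only [List.map_cons, List.map_nil]
  rw [pvLoopA answers answers.length 0 0 0]
  simp only [count_matches_eq_score answers [1,2,3,4,5] (by norm_num),
      count_matches_eq_score answers [2,1,2,3,2,4,2,5] (by norm_num),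
      count_matches_eq_score answers [3,3,1,1,2,2,4,4,5,5] (by norm_num)]
  simp only [zero_add, List.length_cons, List.length_nil]
  norm_num
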